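-- pv_equiv track=rewrite | github.com/testzer0/AmbiQT | benchmark/col-synonyms/generate.py | extract_column_name
-- ===== SOURCE A (Python) =====
-- def extract_column_name(s):
--     if '(' in s and ')' in s:
--         return extract_column_name(s[s.find('(')+1:s.find(')')])
--     if ' ' in s:
--         return extract_column_name(s.split(' ')[-1])
--     if '.' in s:
--         return s[s.rfind('.')+1:]
--     return s
-- ===== SOURCE B (Python) =====
-- def extract_column_name(s):
--     # Each of A's recursive branches can fire at most once (the paren slice
--     # contains no ')', a last token contains no ' '), so three sequential
--     # conditional steps replace the recursion.
--     if '(' in s and ')' in s: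
--         s = s[s.find('(')+1:s.find(')')]
--     if ' ' in s:
--         s = s[s.rfind(' ')+1:]
--     if '.' in s:
--         s = s[s.rfind('.')+1:]
--     return s
-- ===== Notes on version B (the rewrite author's own statement) =====
-- stated objective: simpler
-- what changed: Replaces the tail recursion by three straight-line conditional rewrites (slice between first parens, suffix after last space, suffix after last dot), justified by the invariant that each branch of A can fire at most once.
import Mathlib
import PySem

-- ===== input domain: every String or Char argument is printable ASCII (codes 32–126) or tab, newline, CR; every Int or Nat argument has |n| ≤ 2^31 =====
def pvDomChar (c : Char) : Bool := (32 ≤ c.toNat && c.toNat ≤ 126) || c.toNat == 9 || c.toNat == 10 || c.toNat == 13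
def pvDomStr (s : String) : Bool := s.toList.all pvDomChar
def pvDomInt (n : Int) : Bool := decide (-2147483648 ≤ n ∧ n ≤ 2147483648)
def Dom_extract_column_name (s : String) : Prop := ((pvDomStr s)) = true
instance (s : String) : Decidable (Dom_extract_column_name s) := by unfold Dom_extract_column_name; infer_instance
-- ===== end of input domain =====

-- B replaces A's tail recursion by three straight-line conditional rewrites (each of A's
-- branches can fire at most once); objective: simpler.

-- ===== PORT A =====
-- helper definitions/lemmas needed by port A's termination proof (cited in decreasing_by),
-- hence above the port

-- the suffix of l after the last occurrence of c (l itself if c ∉ l); proof-level characterisation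
def pvAfterLast (c : Char) (l : List Char) : List Char :=
  (l.reverse.takeWhile (fun x => x != c)).reverse

theorem pvAfterLast_length_lt (c : Char) (l : List Char) (h : c ∈ l) :
    (pvAfterLast c l).length < l.length := by
  have hle := (List.takeWhile_prefix (l := l.reverse) (p := fun x => x != c)).length_le
  simp only [pvAfterLast, List.length_reverse]
  rcases lt_or_eq_of_le (by simpa using hle) with h' | h'
  · simpa using h'
  · exfalso
    have heq : l.reverse.takeWhile (fun x => x != c) = l.reverse :=
      (List.takeWhile_prefix _).eq_of_length (by simpa using h')
    have := List.takeWhile_eq_self_iff.mp heq c (by simpa using h)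
    simp at this

theorem pvAfterLast_of_not_mem (c : Char) (l : List Char) (h : c ∉ l) :
    pvAfterLast c l = l := by
  have h2 : l.reverse.takeWhile (fun x => x != c) = l.reverse :=
    List.takeWhile_eq_self_iff.mpr (by
      intro x hx; simp; rintro rfl; exact h (by simpa using hx))
  simp [pvAfterLast, h2]

theorem pvTakeWhile_append_stop {q : Char → Bool} {c : Char} (hq : q c = false)
    (xs ys : List Char) : List.takeWhile q (xs ++ c :: ys) = List.takeWhile q xs := by
  induction xs with
  | nil => simp [hq]
  | cons x xs ih => by_cases hx : q x <;> simp [hx, ih]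

theorem pvAfterLast_append (c : Char) (xs ys : List Char) :
    pvAfterLast c (xs ++ c :: ys) = pvAfterLast c ys := by
  simp only [pvAfterLast, List.reverse_append, List.reverse_cons]
  rw [List.append_assoc, List.singleton_append,
    pvTakeWhile_append_stop (by simp) ys.reverse xs.reverse]

theorem pvPrefixChar (c : Char) (t : List Char) :
    [c].isPrefixOf t = true ↔ t.head? = some c := by
  cases t with
  | nil => simp
  | cons x xs =>
    rw [List.isPrefixOf_cons₂, List.isPrefixOf_nil_left]
    simp only [Bool.and_true, beq_iff_eq, List.head?_cons, Option.some.injEq]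
    exact eq_comm

theorem pvGetLast (ps : List (List Char)) (p : List Char) :
    PySem.List.pyGetD (ps ++ [p]) (-1) [] = p := by
  simp [PySem.List.pyGetD, PySem.List.pyGet?, PySem.List.pyIdx?]

-- the decomposition at the last occurrence
theorem pvSplitOn_go_last (c : Char) :
    ∀ (fuel : Nat) (l cur : List Char) (acc : List (List Char)),
      l.length < fuel → c ∉ cur →
      ∃ ps, PySem.Chars.splitOn.go [c] fuel l cur acc
            = acc.reverse ++ ps ++ [pvAfterLast c (cur.reverse ++ l)] := by
  intro fuel
  induction fuel with
  | zero => intro l cur acc h; omega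
  | succ n ih =>
    intro l cur acc hlen hcur
    cases l with
    | nil =>
      refine ⟨[], ?_⟩
      rw [PySem.Chars.splitOn.go.eq_def]
      show (cur.reverse :: acc).reverse = acc.reverse ++ [] ++ [pvAfterLast c (cur.reverse ++ [])]
      have h2 : pvAfterLast c (cur.reverse ++ []) = cur.reverse := by
        rw [List.append_nil]
        exact pvAfterLast_of_not_mem c cur.reverse (by simpa using hcur)
      rw [h2]
      simp
    | cons h rest =>
      rw [PySem.Chars.splitOn.go.eq_def]
      by_cases hc : h = c
      · subst hc
        have hpfx : [h].isPrefixOf (h :: rest) = true := (pvPrefixChar _ _).mpr (by simp)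
        simp only [hpfx, if_pos, List.length_cons, List.length_nil, List.drop_succ_cons,
          List.drop_zero]
        obtain ⟨ps, hps⟩ := ih rest [] (cur.reverse :: acc) (by simp at hlen; omega) (by simp)
        refine ⟨cur.reverse :: ps, ?_⟩
        rw [hps]
        rw [pvAfterLast_append]
        simp
      · have hpfx : [c].isPrefixOf (h :: rest) = false := by
          rw [Bool.eq_false_iff]
          intro hx
          exact hc (by simpa [eq_comm] using (pvPrefixChar _ _).mp hx)
        simp only [hpfx]
        obtain ⟨ps, hps⟩ := ih rest (h :: cur) acc (by simp at hlen ⊢; omega)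
          (by simp [hcur]; exact fun hh => hc hh.symm)
        refine ⟨ps, ?_⟩
        rw [hps]
        simp

theorem pvSplitLast (c : Char) (l : List Char) :
    PySem.List.pyGetD (PySem.Chars.splitOn l [c]) (-1) [] = pvAfterLast c l := by
  obtain ⟨ps, hps⟩ := pvSplitOn_go_last c (l.length + 1) l [] [] (by omega) (by simp)
  show PySem.List.pyGetD (PySem.Chars.splitOn.go [c] (l.length + 1) l [] []) (-1) [] = _
  rw [hps]
  exact pvGetLast ps (pvAfterLast c l)

theorem pvMemIsIn (c : Char) (l : List Char) :
    PySem.Chars.isIn [c] l = true ↔ c ∈ l := by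
  rw [PySem.Chars.isIn_iff_infix, List.singleton_infix_iff]

theorem pvT1 (s : List Char)
    (h : (PySem.Chars.isIn ['('] s && PySem.Chars.isIn [')'] s) = true) :
    (PySem.Chars.slice s (some (PySem.Chars.find s ['('] + 1))
      (some (PySem.Chars.find s [')']))).length < s.length := by
  have hop : '(' ∈ s := (pvMemIsIn _ _).mp (by simp at h; exact h.1)
  have hf : 0 ≤ PySem.Chars.find s ['('] := by
    rw [PySem.Chars.find_nonneg_iff, List.singleton_infix_iff]; exact hop
  have hlen : 0 < s.length := List.length_pos_iff.mpr (by rintro rfl; simp at hop)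
  rw [PySem.Chars.slice_eq_listSlice, PySem.List.length_slice]
  have ha : 1 ≤ PySem.List.clampIdx s.length (PySem.Chars.find s ['('] + 1) := by
    unfold PySem.List.clampIdx
    rw [if_neg (by omega)]
    omega
  have hb := PySem.List.clampIdx_le s.length (PySem.Chars.find s [')'])
  omega

-- termination: the last space-separated token is strictly shorter
theorem pvT2 (s : List Char) (h : PySem.Chars.isIn [' '] s = true) :
    (PySem.List.pyGetD (PySem.Chars.splitOn s [' ']) (-1) []).length < s.length := by
  rw [pvSplitLast]
  exact pvAfterLast_length_lt _ _ ((pvMemIsIn _ _).mp h)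

-- A's recursion, on the code points (PySem.Chars is the definition side of PySem.Str);
-- s.split(' ')[-1] is PySem.List.pyGetD … (-1) [] : exact, split always returns a nonempty list
def ecnA (s : List Char) : List Char :=
  if h1 : (PySem.Chars.isIn ['('] s && PySem.Chars.isIn [')'] s) = true then
    ecnA (PySem.Chars.slice s (some (PySem.Chars.find s ['('] + 1))
          (some (PySem.Chars.find s [')'])))
  else if h2 : PySem.Chars.isIn [' '] s = true then
    ecnA (PySem.List.pyGetD (PySem.Chars.splitOn s [' ']) (-1) [])
  else if PySem.Chars.isIn ['.'] s = true then
    PySem.Chars.slice s (some (PySem.Chars.rfind s ['.'] + 1)) none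
  else s
termination_by s.length
decreasing_by
  · exact pvT1 s h1
  · exact pvT2 s h2

def extract_column_name (s : String) : String := String.ofList (ecnA s.toList)

-- ===== PORT B =====
def ecnB (s : List Char) : List Char :=
  let s1 := if (PySem.Chars.isIn ['('] s && PySem.Chars.isIn [')'] s) = true then
      PySem.Chars.slice s (some (PySem.Chars.find s ['('] + 1))
        (some (PySem.Chars.find s [')']))
    else s
  let s2 := if PySem.Chars.isIn [' '] s1 = true then
      PySem.Chars.slice s1 (some (PySem.Chars.rfind s1 [' '] + 1)) none
    else s1
  if PySem.Chars.isIn ['.'] s2 = true then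
    PySem.Chars.slice s2 (some (PySem.Chars.rfind s2 ['.'] + 1)) none
  else s2

def extract_column_name_alt (s : String) : String := String.ofList (ecnB s.toList)

-- ===== PRECONDITION & SPEC =====
def Spec_extract_column_name (s : String) (out : String) : Prop := out = extract_column_name_alt s
instance (s : String) (out : String) : Decidable (Spec_extract_column_name s out) := by unfold Spec_extract_column_name; infer_instance

-- ===== CLAIM (what is proved, stated in full; the proofs are below) =====
def Claim_equal_extract_column_name : Prop := ∀ (s : String), Dom_extract_column_name s → Spec_extract_column_name s (extract_column_name s)

-- ===== LEMMAS AND PROOFS =====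

theorem pvAfterLast_not_mem (c : Char) (l : List Char) : c ∉ pvAfterLast c l := by
  intro h
  have := List.mem_takeWhile_imp (by simpa [pvAfterLast] using h)
  simp at this

theorem pvAfterLast_subset (c : Char) (l : List Char) : ∀ x ∈ pvAfterLast c l, x ∈ l := by
  intro x hx
  have : x ∈ l.reverse.takeWhile (fun x => x != c) := by simpa [pvAfterLast] using hx
  have := (List.takeWhile_prefix (l := l.reverse) (p := fun x => x != c)).subset this
  simpa using this

theorem pvAfterLast_decomp (c : Char) (l : List Char) (h : c ∈ l) :
    ∃ u, l = u ++ c :: pvAfterLast c l := by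
  have hsplit := (List.takeWhile_append_dropWhile (p := fun x => x != c) (l := l.reverse)).symm
  rcases hd : l.reverse.dropWhile (fun x => x != c) with _ | ⟨x, w⟩
  · exfalso
    have hmem : c ∈ l.reverse := by simpa using h
    rw [hsplit, hd] at hmem
    have := List.mem_takeWhile_imp (by simpa using hmem)
    simp at this
  · have hx : x = c := by
      have := List.head?_dropWhile_not (p := fun x => x != c) (l := l.reverse)
      rw [hd] at this
      simpa using this
    rw [hx] at hd
    refine ⟨w.reverse, ?_⟩
    conv_lhs => rw [← l.reverse_reverse, ← List.takeWhile_append_dropWhile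
      (p := fun x => x != c) (l := l.reverse), hd]
    simp [pvAfterLast]

theorem pvPrefixCharP (c : Char) (t : List Char) :
    [c] <+: t ↔ t.head? = some c := by
  rw [← List.isPrefixOf_iff_prefix, pvPrefixChar]

theorem pvParenSliceNoClose (s : List Char) (h : PySem.Chars.isIn [')'] s = true)
    (a : Int) :
    ')' ∉ PySem.Chars.slice s (some a) (some (PySem.Chars.find s [')'])) := by
  intro hmem
  have hf : 0 ≤ PySem.Chars.find s [')'] := by
    rw [PySem.Chars.find_nonneg_iff, List.singleton_infix_iff]
    exact (pvMemIsIn _ _).mp h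
  have hspec := (PySem.Chars.find_spec (s := s) (sub := [')']) hf).2
  rw [PySem.Chars.slice_eq_listSlice] at hmem
  dsimp only [PySem.List.slice] at hmem
  set a' := PySem.List.clampIdx s.length a with ha'
  set b' := PySem.List.clampIdx s.length (PySem.Chars.find s [')']) with hb'
  obtain ⟨j, hj, hjv⟩ := List.mem_iff_getElem.mp hmem
  rw [List.getElem_take, List.getElem_drop] at hjv
  have hjlen : j < (List.take (b' - a') (List.drop a' s)).length := hj
  simp only [List.length_take, List.length_drop] at hjlen
  have hidx : a' + j < b' := by omega
  have hble : b' ≤ (PySem.Chars.find s [')']).toNat := by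
    rw [hb']
    unfold PySem.List.clampIdx
    rw [if_neg (by omega)]
    omega
  refine hspec (a' + j) (by omega) ?_
  rw [pvPrefixCharP, List.head?_drop]
  rw [List.getElem?_eq_getElem (by omega)]
  rw [hjv]

theorem pvRfindGo_eq (c : Char) (l : List Char) (k : Nat)
    (hk : l[k]? = some c) (hhi : ∀ i : Nat, k < i → l[i]? ≠ some c) :
    ∀ j : Nat, k ≤ j → PySem.Chars.rfind.go l [c] j = (k : Int) := by
  intro j
  induction j with
  | zero =>
    intro hj
    have hk0 : k = 0 := by omega
    subst hk0
    rw [PySem.Chars.rfind.go.eq_def]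
    have : [c].isPrefixOf l = true := by
      rw [pvPrefixChar]
      rw [← List.head?_drop] at hk
      simpa using hk
    simp [this]
  | succ j ih =>
    intro hj
    rw [PySem.Chars.rfind.go.eq_def]
    by_cases hkj : k = j + 1
    · subst hkj
      have : [c].isPrefixOf (List.drop (j + 1) l) = true := by
        rw [pvPrefixChar, List.head?_drop]; exact hk
      simp [this]
    · have hlt : k ≤ j := by omega
      have : [c].isPrefixOf (List.drop (j + 1) l) = false := by
        rw [Bool.eq_false_iff]
        intro hx
        rw [pvPrefixChar, List.head?_drop] at hx
        exact hhi (j + 1) (by omega) hx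
      simp only [this]
      simpa using ih hlt

theorem pvRfindSlice (c : Char) (l : List Char) (h : c ∈ l) :
    PySem.List.slice l (some (PySem.Chars.rfind l [c] + 1)) none = pvAfterLast c l := by
  obtain ⟨u, hu⟩ := pvAfterLast_decomp c l h
  set t := pvAfterLast c l with ht
  have hct : c ∉ t := pvAfterLast_not_mem c l
  have hk : l[u.length]? = some c := by
    rw [hu]
    rw [List.getElem?_append_right (by omega)]
    simp
  have hhi : ∀ i : Nat, u.length < i → l[i]? ≠ some c := by
    intro i hi hbad
    rw [hu] at hbad
    rw [List.getElem?_append_right (by omega)] at hbad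
    rcases Nat.exists_eq_add_of_lt hi with ⟨m, rfl⟩
    have : (c :: t)[u.length + m + 1 - u.length]? = some c := hbad
    have hm : u.length + m + 1 - u.length = m + 1 := by omega
    rw [hm] at this
    simp only [List.getElem?_cons_succ] at this
    exact hct (List.mem_of_getElem? this)
  have hrf : PySem.Chars.rfind l [c] = (u.length : Int) := by
    show PySem.Chars.rfind.go l [c] l.length = _
    apply pvRfindGo_eq c l u.length hk hhi
    rw [hu]; simp
  rw [hrf]
  rw [PySem.List.slice_from l (by omega)]
  have : ((u.length : Int) + 1).toNat = u.length + 1 := by omega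
  rw [this, hu]
  have : u ++ c :: t = (u ++ [c]) ++ t := by simp
  rw [this]
  have hlen : u.length + 1 = (u ++ [c]).length := by simp
  rw [hlen, List.drop_left]

-- B's three steps, named for the proofs (A's space step as pvSpaceA)
def pvDot (u : List Char) : List Char :=
  if PySem.Chars.isIn ['.'] u = true then
    PySem.Chars.slice u (some (PySem.Chars.rfind u ['.'] + 1)) none
  else u

def pvSpaceA (u : List Char) : List Char :=
  if PySem.Chars.isIn [' '] u = true then
    PySem.List.pyGetD (PySem.Chars.splitOn u [' ']) (-1) []
  else u

def pvSpaceB (u : List Char) : List Char :=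
  if PySem.Chars.isIn [' '] u = true then
    PySem.Chars.slice u (some (PySem.Chars.rfind u [' '] + 1)) none
  else u

-- B's space step equals A's s.split(' ')[-1]
theorem pvSpaceAB (u : List Char) : pvSpaceA u = pvSpaceB u := by
  unfold pvSpaceA pvSpaceB
  by_cases hs : PySem.Chars.isIn [' '] u = true
  · rw [if_pos hs, if_pos hs, pvSplitLast, PySem.Chars.slice_eq_listSlice,
      pvRfindSlice ' ' u ((pvMemIsIn _ _).mp hs)]
  · rw [if_neg hs, if_neg hs]

theorem pvParenFalse_mono (t u : List Char) (hsub : ∀ x ∈ t, x ∈ u)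
    (hp : (PySem.Chars.isIn ['('] u && PySem.Chars.isIn [')'] u) = false) :
    (PySem.Chars.isIn ['('] t && PySem.Chars.isIn [')'] t) = false := by
  rw [Bool.and_eq_false_iff] at hp ⊢
  rcases hp with h | h
  · exact Or.inl (by
      rw [Bool.eq_false_iff] at h ⊢
      exact fun hx => h ((pvMemIsIn _ _).mpr (hsub _ ((pvMemIsIn _ _).mp hx))))
  · exact Or.inr (by
      rw [Bool.eq_false_iff] at h ⊢
      exact fun hx => h ((pvMemIsIn _ _).mpr (hsub _ ((pvMemIsIn _ _).mp hx))))

-- A with the paren branch dead runs exactly B's last two steps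
theorem pvEcnA_noparen (u : List Char)
    (hp : (PySem.Chars.isIn ['('] u && PySem.Chars.isIn [')'] u) = false) :
    ecnA u = pvDot (pvSpaceA u) := by
  by_cases hs : PySem.Chars.isIn [' '] u = true
  · rw [ecnA.eq_def, dif_neg (by simp [hp]), dif_pos hs]
    have ht : PySem.List.pyGetD (PySem.Chars.splitOn u [' ']) (-1) []
        = pvAfterLast ' ' u := pvSplitLast ' ' u
    set t := PySem.List.pyGetD (PySem.Chars.splitOn u [' ']) (-1) [] with htdef
    have hsub : ∀ x ∈ t, x ∈ u := by rw [ht]; exact pvAfterLast_subset ' ' u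
    have hnosp : PySem.Chars.isIn [' '] t = false := by
      rw [Bool.eq_false_iff]
      intro hx
      exact pvAfterLast_not_mem ' ' u (ht ▸ (pvMemIsIn _ _).mp hx)
    rw [ecnA.eq_def, dif_neg (by simp [pvParenFalse_mono t u hsub hp]),
      dif_neg (by simp [hnosp])]
    unfold pvSpaceA pvDot
    rw [if_pos hs]
  · rw [ecnA.eq_def, dif_neg (by simp [hp]), dif_neg (by simp [hs])]
    unfold pvSpaceA pvDot
    rw [if_neg hs]

theorem pvEcn_eq (l : List Char) : ecnA l = ecnB l := by
  have hB : ecnB l = pvDot (pvSpaceB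
      (if (PySem.Chars.isIn ['('] l && PySem.Chars.isIn [')'] l) = true then
        PySem.Chars.slice l (some (PySem.Chars.find l ['('] + 1))
          (some (PySem.Chars.find l [')']))
      else l)) := rfl
  by_cases hp : (PySem.Chars.isIn ['('] l && PySem.Chars.isIn [')'] l) = true
  · rw [hB, if_pos hp, ecnA.eq_def, dif_pos hp]
    set t := PySem.Chars.slice l (some (PySem.Chars.find l ['('] + 1))
      (some (PySem.Chars.find l [')'])) with ht
    have hno : PySem.Chars.isIn [')'] t = false := by
      rw [Bool.eq_false_iff]
      intro hx
      exact pvParenSliceNoClose l (by simp at hp; exact hp.2) _ ((pvMemIsIn _ _).mp hx)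
    have hnopar : (PySem.Chars.isIn ['('] t && PySem.Chars.isIn [')'] t) = false := by
      rw [Bool.and_eq_false_iff]; exact Or.inr hno
    rw [pvEcnA_noparen t hnopar, pvSpaceAB]
  · rw [hB, if_neg hp, pvEcnA_noparen l (Bool.eq_false_iff.mpr hp), pvSpaceAB]

-- ===== VERDICT (by name: the statement is the Claim_ definition above) =====
theorem extract_column_name_spec : Claim_equal_extract_column_name := by
  intro s _
  unfold Spec_extract_column_name extract_column_name extract_column_name_alt
  rw [pvEcn_eq]
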